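-- pv_equiv track=rewrite | github.com/r2dt-bio/R2DT | utils/rnaview.py | fix_invalid_pairs
-- ===== SOURCE A (Python) =====
-- def fix_invalid_pairs(dot_bracket):
--     """
--     Fix invalid dot-bracket patterns like "()" by converting them to "..".
--
--     Args:
--         dot_bracket (str): Dot-bracket notation string.
--
--     Returns:
--         str: Cleaned dot-bracket notation.
--     """
--     result = list(dot_bracket)
--     changed = True
--
--     # Repeatedly remove invalid "()" pairs until none remain
--     while changed:
--         changed = False
--         i = 0
--         while i < len(result) - 1:
--             if result[i] == "(" and result[i + 1] == ")":
--                 result[i] = "."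
--                 result[i + 1] = "."
--                 changed = True
--             i += 1
--
--     return "".join(result)
-- ===== SOURCE B (Python) =====
-- def fix_invalid_pairs(dot_bracket):
--     """Fix invalid "()" pairs by converting them to ".." in one left-to-right pass."""
--     out = []
--     i = 0
--     n = len(dot_bracket)
--     while i < n:
--         if dot_bracket[i] == "(" and i + 1 < n and dot_bracket[i + 1] == ")":
--             out.append(".")
--             out.append(".")
--             i += 2
--         else:
--             out.append(dot_bracket[i])
--             i += 1
--     return "".join(out)
-- ===== Notes on version B (the rewrite author's own statement) =====
-- stated objective: simpler
-- what changed: Replaced A's in-place mutation with a repeat-until-no-change convergence loop by a single left-to-right pass that emits '..' for each adjacent '()' and copies everything else (a '()' replacement can never create a new adjacent '()', so one pass suffices).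
import Mathlib
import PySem

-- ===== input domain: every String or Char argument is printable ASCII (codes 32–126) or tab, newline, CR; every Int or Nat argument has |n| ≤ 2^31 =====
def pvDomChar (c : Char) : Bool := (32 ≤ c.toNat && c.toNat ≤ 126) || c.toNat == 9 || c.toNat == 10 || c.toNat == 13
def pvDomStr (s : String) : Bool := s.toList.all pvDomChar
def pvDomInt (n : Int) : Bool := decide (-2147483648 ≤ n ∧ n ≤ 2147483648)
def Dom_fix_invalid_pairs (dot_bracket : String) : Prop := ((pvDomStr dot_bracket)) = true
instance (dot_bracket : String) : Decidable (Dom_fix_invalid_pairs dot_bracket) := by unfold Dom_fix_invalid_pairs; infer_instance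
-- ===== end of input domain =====

-- B replaces A's in-place mutation with a convergence loop by a single left-to-right
-- pass (one '()' replacement can never create a new adjacent '()'); return values proved equal.

-- ===== PORT A =====
-- inner while loop: i scans while i < len(result)-1, replacing result[i],result[i+1]
-- with '.','.' when they are '(' , ')'; returns (result, changed)
def pvInnerA (res : List Char) (i : Nat) (changed : Bool) : List Char × Bool :=
  if _h : i + 1 < res.length then
    if res.getD i ' ' = '(' ∧ res.getD (i + 1) ' ' = ')' then
      pvInnerA ((res.set i '.').set (i + 1) '.') (i + 1) true
    else
      pvInnerA res (i + 1) changed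
  else
    (res, changed)
termination_by res.length - i
decreasing_by all_goals simp_all [List.length_set]; omega

-- outer 'while changed' loop; fuel length+1 is never exhausted (at most two passes occur)
def pvOuterA : Nat → List Char → List Char
  | 0, res => res
  | Nat.succ n, res =>
    let p := pvInnerA res 0 false
    if p.2 then pvOuterA n p.1 else p.1

def fix_invalid_pairs (dot_bracket : String) : String :=
  String.mk (pvOuterA (dot_bracket.toList.length + 1) dot_bracket.toList)

-- ===== PORT B =====
-- single pass: emit ".." for an adjacent "()"; otherwise copy the character
def pvGoB : List Char → List Char
  | [] => []
  | [c] => [c]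
  | c :: d :: rest =>
    if c = '(' ∧ d = ')' then '.' :: '.' :: pvGoB rest
    else c :: pvGoB (d :: rest)

def fix_invalid_pairs_alt (dot_bracket : String) : String :=
  String.mk (pvGoB dot_bracket.toList)

-- ===== PRECONDITION & SPEC =====
def Spec_fix_invalid_pairs (dot_bracket : String) (out : String) : Prop := out = fix_invalid_pairs_alt dot_bracket
instance (dot_bracket : String) (out : String) : Decidable (Spec_fix_invalid_pairs dot_bracket out) := by unfold Spec_fix_invalid_pairs; infer_instance

-- ===== CLAIM (what is proved, stated in full; the proofs are below) =====
def Claim_equal_fix_invalid_pairs : Prop := ∀ (dot_bracket : String), Dom_fix_invalid_pairs dot_bracket → Spec_fix_invalid_pairs dot_bracket (fix_invalid_pairs dot_bracket)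

-- ===== LEMMAS AND PROOFS =====

-- did a pass change anything?
def pvChg : List Char → Bool
  | [] => false
  | [_] => false
  | c :: d :: rest => if c = '(' ∧ d = ')' then true else pvChg (d :: rest)

theorem pvGetD_append_cons (pre : List Char) (x : Char) (xs : List Char) (d : Char) :
    (pre ++ x :: xs).getD pre.length d = x := by
  induction pre with
  | nil => rfl
  | cons a tl ih => simpa using ih

theorem pvSet_append_cons (pre : List Char) (x y : Char) (xs : List Char) :
    (pre ++ x :: xs).set pre.length y = pre ++ y :: xs := by
  induction pre with
  | nil => rfl
  | cons a tl ih => simpa using ih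

theorem pvInnerA_eq (suf : List Char) : ∀ (pre : List Char) (c : Bool),
    pvInnerA (pre ++ suf) pre.length c = (pre ++ pvGoB suf, c || pvChg suf) := by
  induction suf using pvGoB.induct with
  | case1 =>
    intro pre c
    rw [pvInnerA]
    simp [pvGoB, pvChg]
  | case2 x =>
    intro pre c
    rw [pvInnerA]
    simp [pvGoB, pvChg]
  | case3 c0 c1 rest hpair ih =>
    intro pre c
    rw [pvInnerA]
    have hlen : pre.length + 1 < (pre ++ c0 :: c1 :: rest).length := by
      simp
    rw [dif_pos hlen]
    have h0 : (pre ++ c0 :: c1 :: rest).getD pre.length ' ' = c0 := pvGetD_append_cons _ _ _ _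
    have h1 : (pre ++ c0 :: c1 :: rest).getD (pre.length + 1) ' ' = c1 := by
      have := pvGetD_append_cons (pre ++ [c0]) c1 rest ' '
      simpa using this
    rw [h0, h1, if_pos hpair]
    obtain ⟨h0', h1'⟩ := hpair
    subst h0' h1'
    have hs1 : (pre ++ '(' :: ')' :: rest).set pre.length '.' = pre ++ '.' :: ')' :: rest :=
      pvSet_append_cons _ _ _ _
    have hs2 : (pre ++ '.' :: ')' :: rest).set (pre.length + 1) '.' = pre ++ '.' :: '.' :: rest := by
      have := pvSet_append_cons (pre ++ ['.']) ')' '.' rest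
      simpa using this
    rw [hs1, hs2]
    have : pre ++ '.' :: '.' :: rest = (pre ++ ['.']) ++ '.' :: rest := by simp
    clear this
    cases rest with
    | nil =>
      rw [pvInnerA]
      have hno : ¬ (pre.length + 1 + 1 < (pre ++ ['.', '.']).length) := by simp
      rw [dif_neg hno]
      simp [pvGoB, pvChg]
    | cons d r =>
      rw [pvInnerA]
      have hlen2 : pre.length + 1 + 1 < (pre ++ '.' :: '.' :: d :: r).length := by simp; omega
      rw [dif_pos hlen2]
      have hdot : (pre ++ '.' :: '.' :: d :: r).getD (pre.length + 1) ' ' = '.' := by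
        have := pvGetD_append_cons (pre ++ ['.']) '.' (d :: r) ' '
        simpa using this
      have hnp : ¬ ((pre ++ '.' :: '.' :: d :: r).getD (pre.length + 1) ' ' = '(' ∧
          (pre ++ '.' :: '.' :: d :: r).getD (pre.length + 1 + 1) ' ' = ')') := by
        rw [hdot]; intro h; exact absurd h.1 (by decide)
      rw [if_neg hnp]
      have hsplit : pre ++ '.' :: '.' :: d :: r = (pre ++ ['.', '.']) ++ d :: r := by simp
      have hl2 : pre.length + 1 + 1 = (pre ++ ['.', '.']).length := by simp
      rw [hsplit, hl2, ih (pre ++ ['.', '.']) true]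
      simp [pvGoB, pvChg]
  | case4 c0 c1 rest hpair ih =>
    intro pre c
    rw [pvInnerA]
    have hlen : pre.length + 1 < (pre ++ c0 :: c1 :: rest).length := by
      simp
    rw [dif_pos hlen]
    have h0 : (pre ++ c0 :: c1 :: rest).getD pre.length ' ' = c0 := pvGetD_append_cons _ _ _ _
    have h1 : (pre ++ c0 :: c1 :: rest).getD (pre.length + 1) ' ' = c1 := by
      have := pvGetD_append_cons (pre ++ [c0]) c1 rest ' '
      simpa using this
    rw [h0, h1, if_neg hpair]
    have : pre ++ c0 :: c1 :: rest = (pre ++ [c0]) ++ c1 :: rest := by simp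
    rw [this]
    have hl : pre.length + 1 = (pre ++ [c0]).length := by simp
    rw [hl, ih (pre ++ [c0]) c]
    simp [pvGoB, pvChg, if_neg hpair]

-- an unchanged pass is the identity
theorem pvChg_false_fix (l : List Char) (h : pvChg l = false) : pvGoB l = l := by
  induction l using pvGoB.induct with
  | case1 => rfl
  | case2 x => rfl
  | case3 c0 c1 rest hpair ih =>
    exfalso; simp [pvChg, if_pos hpair] at h
  | case4 c0 c1 rest hpair ih =>
    simp [pvChg, if_neg hpair] at h
    simp [pvGoB, if_neg hpair, ih h]

theorem pvChg_cons_not_lparen (c : Char) (l : List Char) (hc : c ≠ '(') :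
    pvChg (c :: l) = pvChg l := by
  cases l with
  | nil => rfl
  | cons d r => simp [pvChg, hc]

theorem pvGoB_head (d : Char) (r : List Char) :
    (pvGoB (d :: r)).head? = some d ∨ (pvGoB (d :: r)).head? = some '.' := by
  cases r with
  | nil => left; rfl
  | cons e r' =>
    by_cases h : d = '(' ∧ e = ')'
    · right; simp [pvGoB, if_pos h]
    · left; simp [pvGoB, if_neg h]

-- a pass never creates a new "()"
theorem pvChg_pvGoB (l : List Char) : pvChg (pvGoB l) = false := by
  induction l using pvGoB.induct with
  | case1 => rfl
  | case2 x => rfl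
  | case3 c0 c1 rest hpair ih =>
    have hdot : ('.' : Char) ≠ '(' := by decide
    simp only [pvGoB, if_pos hpair]
    rw [pvChg_cons_not_lparen _ _ hdot, pvChg_cons_not_lparen _ _ hdot]
    exact ih
  | case4 c0 c1 rest hpair ih =>
    simp only [pvGoB, if_neg hpair]
    by_cases hc : c0 = '('
    · subst hc
      have hd : c1 ≠ ')' := by
        intro h; exact hpair ⟨rfl, h⟩
      have hh := pvGoB_head c1 rest
      cases hg : pvGoB (c1 :: rest) with
      | nil => rfl
      | cons e y' =>
        have he : e ≠ ')' := by
          rw [hg] at hh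
        
          rcases hh with h | h
          · simp at h; subst h; exact hd
          · simp at h; subst h; decide
        have hne : ¬ (('(' : Char) = '(' ∧ e = ')') := fun h => he h.2
        rw [hg] at ih
        cases y' with
        | nil => simp [pvChg, he]
        | cons f y'' =>
          simp [pvChg] at ih ⊢
          exact ⟨he, ih⟩
    · rw [pvChg_cons_not_lparen _ _ hc]
      exact ih

theorem pvChg_true_len (l : List Char) (h : pvChg l = true) : 2 ≤ l.length := by
  cases l with
  | nil => simp [pvChg] at h
  | cons a t =>
    cases t with
    | nil => simp [pvChg] at h
    | cons b r => simp

theorem pvOuterA_eq (l : List Char) : pvOuterA (l.length + 1) l = pvGoB l := by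
  have h1 : pvInnerA l 0 false = (pvGoB l, pvChg l) := by
    have := pvInnerA_eq l [] false
    simpa using this
  cases hc : pvChg l with
  | false =>
    simp only [pvOuterA, h1, hc, if_neg]
    rfl
  | true =>
    have hlen : 2 ≤ l.length := pvChg_true_len l hc
    obtain ⟨m, hm⟩ : ∃ m, l.length = m + 2 := ⟨l.length - 2, by omega⟩
    rw [hm]
    show pvOuterA (m + 2 + 1) l = pvGoB l
    simp only [pvOuterA, h1, hc, if_pos]
    have h2 : pvInnerA (pvGoB l) 0 false = (pvGoB (pvGoB l), pvChg (pvGoB l)) := by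
      have := pvInnerA_eq (pvGoB l) [] false
      simpa using this
    have hc2 : pvChg (pvGoB l) = false := pvChg_pvGoB l
    simp only [pvOuterA, h2, hc2, Bool.false_eq_true, if_false]
    exact pvChg_false_fix _ hc2

-- ===== VERDICT (by name: the statement is the Claim_ definition above) =====
theorem fix_invalid_pairs_spec : Claim_equal_fix_invalid_pairs := by
  intro s _
  show fix_invalid_pairs s = fix_invalid_pairs_alt s
  unfold fix_invalid_pairs fix_invalid_pairs_alt
  rw [pvOuterA_eq]
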